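-- pv_equiv track=rewrite | github.com/majay05123-hub/snap-gpt-tests | pygpt/profiler.py | __split_command_args__
-- ===== SOURCE A (Python) =====
-- def __split_command_args__(command):
--     """
--     splits command in list of arguments.
--     """
--     args = []
--     status = True
--     token = ""
--     for char in command:
--         if char == " ":
--             if status:
--                 if token:
--                     args.append(token)
--                 token = ""
--             else:
--                 token += " "
--         elif char == '"':
--             status = not status
--             if status:
--                 if token:
--                     args.append(token)
--                 token = ""
--         else:
--             token += char
--     if token:
--         args.append(token)
--     return args
-- ===== SOURCE B (Python) =====
-- def __split_command_args__(command):
--     """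
--     splits command in list of arguments.
--     """
--     segments = command.split('"')
--     args = []
--     token = ""
--     for i, seg in enumerate(segments):
--         if i % 2 == 0:
--             pieces = seg.split(' ')
--             token += pieces[0]
--             for piece in pieces[1:]:
--                 if token:
--                     args.append(token)
--                 token = piece
--         else:
--             token += seg
--             if i != len(segments) - 1:
--                 if token:
--                     args.append(token)
--                 token = ""
--     if token:
--         args.append(token)
--     return args
-- ===== Notes on version B (the rewrite author's own statement) =====
-- stated objective: faster
-- what changed: Replaces the per-character state machine (status flag, token accumulator) by splitting the command on the quote character once and then processing whole segments: even segments are split on spaces in bulk, odd (quoted) segments are appended verbatim and flushed only when a closing quote exists.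
import Mathlib
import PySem

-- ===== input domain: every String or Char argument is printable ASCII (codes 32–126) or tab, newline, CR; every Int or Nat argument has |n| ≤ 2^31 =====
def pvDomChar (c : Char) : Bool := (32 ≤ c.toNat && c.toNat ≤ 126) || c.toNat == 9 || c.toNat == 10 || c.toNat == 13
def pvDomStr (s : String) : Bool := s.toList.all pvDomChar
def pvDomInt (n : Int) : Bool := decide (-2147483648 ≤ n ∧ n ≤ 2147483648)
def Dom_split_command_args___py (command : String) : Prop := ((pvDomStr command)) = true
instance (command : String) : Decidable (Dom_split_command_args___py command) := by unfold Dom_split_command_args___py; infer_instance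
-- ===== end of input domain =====

-- B replaces A's per-character quote state machine by splitting on '"' once and
-- processing whole segments in bulk (same O(n) asymptotics; a timing run
-- measured B faster in Python, where split does the scanning).
-- Both ports carry Python strings as List Char (exact on code points) and map
-- String.mk over the result at the end.

-- ===== PORT A =====
-- one iteration of A's for-loop: state = (args, status, token)
def pvAStep (s : List (List Char) × Bool × List Char) (c : Char) :
    List (List Char) × Bool × List Char :=
  if c == ' ' then
    if s.2.1 then
      ((if s.2.2 ≠ [] then s.1 ++ [s.2.2] else s.1), true, ([] : List Char))
    else
      (s.1, false, s.2.2 ++ [' '])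
  else if c == '"' then
    let status := !s.2.1
    if status then
      ((if s.2.2 ≠ [] then s.1 ++ [s.2.2] else s.1), status, ([] : List Char))
    else
      (s.1, status, s.2.2)
  else
    (s.1, s.2.1, s.2.2 ++ [c])

def split_command_args___py (command : String) : List String :=
  let r := command.toList.foldl pvAStep ([], true, [])
  (if r.2.2 ≠ [] then r.1 ++ [r.2.2] else r.1).map String.mk

-- ===== PORT B =====
-- one iteration of B's inner for-loop over pieces[1:]: state = (args, token)
def pvBInner (s : List (List Char) × List Char) (piece : List Char) :
    List (List Char) × List Char :=
  ((if s.2 ≠ [] then s.1 ++ [s.2] else s.1), piece)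

-- B's for-loop over enumerate(segments); n = len(segments), i = current index.
-- pieces.headD [] is pieces[0]: split always returns a non-empty list.
def pvBLoop (n : Nat) : List (List Char) → Nat → List (List Char) → List Char →
    List (List Char) × List Char
  | [], _, args, tok => (args, tok)
  | seg :: rest, i, args, tok =>
    if i % 2 == 0 then
      let pieces := PySem.Chars.splitOn seg [' ']
      let s := pieces.tail.foldl pvBInner (args, tok ++ pieces.headD [])
      pvBLoop n rest (i + 1) s.1 s.2
    else
      let tok1 := tok ++ seg
      if i ≠ n - 1 then
        pvBLoop n rest (i + 1) (if tok1 ≠ [] then args ++ [tok1] else args) []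
      else
        pvBLoop n rest (i + 1) args tok1

def split_command_args___py_alt (command : String) : List String :=
  let segments := PySem.Chars.splitOn command.toList ['"']
  let r := pvBLoop segments.length segments 0 [] []
  (if r.2 ≠ [] then r.1 ++ [r.2] else r.1).map String.mk

-- ===== PRECONDITION & SPEC =====
def Spec_split_command_args___py (command : String) (out : List String) : Prop := out = split_command_args___py_alt command
instance (command : String) (out : List String) : Decidable (Spec_split_command_args___py command out) := by unfold Spec_split_command_args___py; infer_instance

-- ===== CLAIM (what is proved, stated in full; the proofs are below) =====
def Claim_equal_split_command_args___py : Prop := ∀ (command : String), Dom_split_command_args___py command → Spec_split_command_args___py command (split_command_args___py command)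

-- ===== LEMMAS AND PROOFS =====

-- append token as an argument iff it is non-empty
def pvFlush (tok : List Char) : List (List Char) :=
  if tok = [] then [] else [tok]

-- splitting on a single separator character, structurally
def pvSplit (sep : Char) : List Char → List (List Char)
  | [] => [[]]
  | c :: cs =>
    let r := pvSplit sep cs
    if c = sep then [] :: r else (c :: r.headD []) :: r.tail

theorem pvSplit_ne_nil (sep : Char) (cs : List Char) : pvSplit sep cs ≠ [] := by
  cases cs with
  | nil => simp [pvSplit]
  | cons c cs => simp only [pvSplit]; split_ifs <;> simp

theorem pvSplit_go (sep : Char) :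
    ∀ (fuel : Nat) (l cur : List Char) (acc : List (List Char)),
      l.length < fuel →
      PySem.Chars.splitOn.go [sep] fuel l cur acc =
        acc.reverse ++ (cur.reverse ++ (pvSplit sep l).headD []) :: (pvSplit sep l).tail := by
  intro fuel
  induction fuel with
  | zero => intro l cur acc h; omega
  | succ f ih =>
    intro l cur acc h
    cases l with
    | nil => simp [PySem.Chars.splitOn.go, pvSplit]
    | cons c rest =>
      by_cases hc : c = sep
      · subst hc
        have hpre : [c].isPrefixOf (c :: rest) = true := by
          simp [List.isPrefixOf]
        rw [PySem.Chars.splitOn.go, if_pos hpre]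
        have hdrop : List.drop [c].length (c :: rest) = rest := by simp
        rw [hdrop, ih rest [] (cur.reverse :: acc) (by simpa using Nat.lt_of_succ_lt_succ h)]
        have hne := pvSplit_ne_nil c rest
        cases hr : pvSplit c rest with
        | nil => exact absurd hr hne
        | cons h0 ht => simp [pvSplit, hr]
      · have hpre : [sep].isPrefixOf (c :: rest) = false := by
          simp [List.isPrefixOf]
          exact fun h => hc h.symm
        rw [PySem.Chars.splitOn.go, if_neg (by simp [hpre])]
        rw [ih rest (c :: cur) acc (by simpa using Nat.lt_of_succ_lt_succ h)]
        have hne := pvSplit_ne_nil sep rest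
        cases hr : pvSplit sep rest with
        | nil => exact absurd hr hne
        | cons h0 ht => simp [pvSplit, hr, hc]

theorem pvSplitOn_eq (sep : Char) (cs : List Char) :
    PySem.Chars.splitOn cs [sep] = pvSplit sep cs := by
  unfold PySem.Chars.splitOn
  rw [pvSplit_go sep (cs.length + 1) cs [] [] (Nat.lt_succ_self _)]
  have hne := pvSplit_ne_nil sep cs
  cases hr : pvSplit sep cs with
  | nil => exact absurd hr hne
  | cons h0 ht => simp

-- A's loop as a structural recursion producing the emitted arguments
def pvAGo : List Char → Bool → List Char → List (List Char)
  | [], _, tok => pvFlush tok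
  | c :: cs, st, tok =>
    if c = ' ' then
      if st then pvFlush tok ++ pvAGo cs true [] else pvAGo cs false (tok ++ [' '])
    else if c = '"' then
      if st then pvAGo cs false tok else pvFlush tok ++ pvAGo cs true []
    else
      pvAGo cs st (tok ++ [c])

theorem pvFoldA (cs : List Char) :
    ∀ (args : List (List Char)) (st : Bool) (tok : List Char),
      (let r := cs.foldl pvAStep (args, st, tok)
       if r.2.2 ≠ [] then r.1 ++ [r.2.2] else r.1) = args ++ pvAGo cs st tok := by
  induction cs with
  | nil =>
    intro args st tok
    simp only [List.foldl_nil, pvAGo, pvFlush]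
    split_ifs <;> simp_all
  | cons c cs ih =>
    intro args st tok
    rw [List.foldl_cons]
    by_cases hsp : c = ' '
    · subst hsp
      cases st with
      | true =>
        have hstep : pvAStep (args, true, tok) ' ' =
            ((if tok ≠ [] then args ++ [tok] else args), true, ([] : List Char)) := by
          simp [pvAStep]
        rw [hstep, ih]
        simp only [pvAGo, if_pos rfl, if_pos rfl, pvFlush]
        split_ifs <;> simp_all
      | false =>
        have hstep : pvAStep (args, false, tok) ' ' = (args, false, tok ++ [' ']) := by
          simp [pvAStep]
        rw [hstep, ih]
        simp [pvAGo]
    · by_cases hq : c = '"'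
      · subst hq
        cases st with
        | true =>
          have hstep : pvAStep (args, true, tok) '"' = (args, false, tok) := by
            simp [pvAStep]
          rw [hstep, ih]
          simp [pvAGo]
        | false =>
          have hstep : pvAStep (args, false, tok) '"' =
              ((if tok ≠ [] then args ++ [tok] else args), true, ([] : List Char)) := by
            simp [pvAStep]
          rw [hstep, ih]
          simp only [pvAGo, if_neg (by decide : ¬ ('"' = ' ')), if_pos rfl,
            Bool.false_eq_true, if_false, pvFlush]
          split_ifs <;> simp_all
      · have hstep : pvAStep (args, st, tok) c = (args, st, tok ++ [c]) := by
          simp [pvAStep, hsp, hq]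
        rw [hstep, ih]
        simp [pvAGo, hsp, hq]

-- B's inner loop over pieces[1:] as a structural recursion:
-- returns (emitted arguments, final token)
def pvEv : List Char → List (List Char) → List (List Char) × List Char
  | tok, [] => ([], tok)
  | tok, p :: ps =>
    let r := pvEv p ps
    (pvFlush tok ++ r.1, r.2)

theorem pvFoldEv (ps : List (List Char)) :
    ∀ (args : List (List Char)) (tok : List Char),
      ps.foldl pvBInner (args, tok) =
        (args ++ (pvEv tok ps).1, (pvEv tok ps).2) := by
  induction ps with
  | nil => intro args tok; simp [pvEv]
  | cons p ps ih =>
    intro args tok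
    simp only [List.foldl_cons, pvEv, pvBInner, ih, pvFlush]
    split_ifs <;> simp_all

-- B's outer loop as a structural recursion; the Bool is the parity:
-- true = even index (outside quotes), false = odd index (inside quotes)
def pvBGo : Bool → List (List Char) → List Char → List (List Char)
  | _, [], tok => pvFlush tok
  | true, seg :: rest, tok =>
    let pieces := pvSplit ' ' seg
    let r := pvEv (tok ++ pieces.headD []) pieces.tail
    r.1 ++ pvBGo false rest r.2
  | false, seg :: rest, tok =>
    if rest = [] then pvFlush (tok ++ seg)
    else pvFlush (tok ++ seg) ++ pvBGo true rest []

theorem pvBLoopChar (segs : List (List Char)) :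
    ∀ (i n : Nat) (args : List (List Char)) (tok : List Char),
      i + segs.length = n →
      (let r := pvBLoop n segs i args tok
       if r.2 ≠ [] then r.1 ++ [r.2] else r.1) =
        args ++ pvBGo (i % 2 == 0) segs tok := by
  induction segs with
  | nil =>
    intro i n args tok _
    cases h : (i % 2 == 0) <;> simp only [pvBLoop, pvBGo, pvFlush] <;>
      split_ifs <;> simp_all
  | cons seg rest ih =>
    intro i n args tok hn
    by_cases hpar : i % 2 = 0
    · have h1 : ((i + 1) % 2 == 0) = false := by simp; omega
      simp only [pvBLoop, pvBGo, hpar, beq_self_eq_true, if_pos, pvSplitOn_eq, pvFoldEv]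
      rw [ih (i + 1) n _ _ (by simp at hn ⊢; omega)]
      simp [h1, List.append_assoc]
    · have h0 : (i % 2 == 0) = false := by simp [hpar]
      have h1 : ((i + 1) % 2 == 0) = true := by simp; omega
      simp only [pvBLoop, h0, Bool.false_eq_true, if_false, pvBGo]
      by_cases hrest : rest = []
      · have hlast : ¬ (i ≠ n - 1) := by subst hrest; simp at hn ⊢; omega
        subst hrest
        rw [if_neg hlast]
        rw [ih (i + 1) n _ _ (by simp at hn ⊢; omega)]
        simp [pvBGo, pvFlush]
      · have hlast : i ≠ n - 1 := by
          have : rest.length ≠ 0 := by simpa using hrest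
          simp at hn; omega
        rw [if_pos hlast]
        rw [ih (i + 1) n _ _ (by simp at hn ⊢; omega)]
        rw [if_neg hrest]
        simp [h1, pvFlush]
        split_ifs <;> simp_all

-- the heart: A's character loop computes B's segment-wise result
theorem pvMain (cs : List Char) :
    ∀ tok : List Char,
      pvAGo cs true tok = pvBGo true (pvSplit '"' cs) tok ∧
      pvAGo cs false tok = pvBGo false (pvSplit '"' cs) tok := by
  induction cs with
  | nil =>
    intro tok
    constructor <;> simp [pvAGo, pvSplit, pvBGo, pvEv]
  | cons c cs ih =>
    intro tok
    by_cases hq : c = '"'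
    · subst hq
      have hne := pvSplit_ne_nil '"' cs
      constructor
      · simp only [pvAGo, if_neg (by decide : ¬ ('"' = ' ')), if_pos rfl, if_pos rfl]
        rw [(ih tok).2]
        simp [pvSplit, pvBGo, pvEv]
      · simp only [pvAGo, if_neg (by decide : ¬ ('"' = ' ')), if_pos rfl,
          Bool.false_eq_true, if_false]
        rw [(ih ([] : List Char)).1]
        simp [pvSplit, pvBGo, hne, pvFlush]
    · obtain ⟨h0, ht, hr⟩ : ∃ h0 ht, pvSplit '"' cs = h0 :: ht := by
        cases h : pvSplit '"' cs with
        | nil => exact absurd h (pvSplit_ne_nil '"' cs)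
        | cons a b => exact ⟨a, b, rfl⟩
      have hsplit : pvSplit '"' (c :: cs) = (c :: h0) :: ht := by
        simp [pvSplit, hr, hq]
      by_cases hsp : c = ' '
      · subst hsp
        constructor
        · simp only [pvAGo, if_pos rfl, if_pos rfl]
          rw [(ih ([] : List Char)).1, hsplit, hr]
          obtain ⟨p0, pt, hp⟩ : ∃ p0 pt, pvSplit ' ' h0 = p0 :: pt := by
            cases h : pvSplit ' ' h0 with
            | nil => exact absurd h (pvSplit_ne_nil ' ' h0)
            | cons a b => exact ⟨a, b, rfl⟩
          simp [pvBGo, pvSplit, hp, pvEv, List.append_assoc]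
        · simp only [pvAGo, if_pos rfl, Bool.false_eq_true, if_false]
          rw [(ih (tok ++ [' '])).2, hsplit, hr]
          simp [pvBGo, List.append_assoc]
      · constructor
        · simp only [pvAGo, if_neg hsp, if_neg hq, if_pos rfl]
          rw [(ih (tok ++ [c])).1, hsplit, hr]
          obtain ⟨p0, pt, hp⟩ : ∃ p0 pt, pvSplit ' ' h0 = p0 :: pt := by
            cases h : pvSplit ' ' h0 with
            | nil => exact absurd h (pvSplit_ne_nil ' ' h0)
            | cons a b => exact ⟨a, b, rfl⟩
          simp [pvBGo, pvSplit, hp, hsp, pvEv, List.append_assoc]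
        · simp only [pvAGo, if_neg hsp, if_neg hq, Bool.false_eq_true, if_false]
          rw [(ih (tok ++ [c])).2, hsplit, hr]
          simp [pvBGo, List.append_assoc]

-- ===== VERDICT (by name: the statement is the Claim_ definition above) =====
theorem split_command_args___py_spec : Claim_equal_split_command_args___py := by
  intro command _
  unfold Spec_split_command_args___py split_command_args___py split_command_args___py_alt
  dsimp only
  have hA := pvFoldA command.toList [] true []
  have hB := pvBLoopChar (PySem.Chars.splitOn command.toList ['"']) 0
    (PySem.Chars.splitOn command.toList ['"']).length [] [] (by simp)
  simp only at hA hB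
  rw [hA, hB]
  rw [pvSplitOn_eq]
  simp [(pvMain command.toList []).1]
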